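-- pv_equiv track=rewrite | github.com/dchen275/PSU-Projects | CMPSC132_Projects/Project2/Exercise1.py | monthlyTemps
-- ===== SOURCE A (Python) =====
-- def monthlyTemps(temps):
--     monthTemps = {}
--     # number of month - 1
--     # indicating each key will have a list to append to
--     monthTemps.setdefault(0, [])
--     monthTemps.setdefault(1, [])
--     monthTemps.setdefault(2, [])
--     monthTemps.setdefault(3, [])
--     monthTemps.setdefault(4, [])
--     monthTemps.setdefault(5, [])
--     monthTemps.setdefault(6, [])
--     monthTemps.setdefault(7, [])
--     monthTemps.setdefault(8, [])
--     monthTemps.setdefault(9, [])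
--     monthTemps.setdefault(10, [])
--     monthTemps.setdefault(11, [])
--
--     # adding temps by month
--     for value in temps.values():
--         for i in range(len(value)):
--             if i < 12:
--                 monthTemps[i].append(value[i])
--
--     return monthTemps
-- ===== SOURCE B (Python) =====
-- def monthlyTemps(temps):
--     # Column-wise: for each month index 0..11, collect the i-th reading of
--     # every entry that has one (entries shorter than i+1 contribute nothing).
--     return {i: [v[i] for v in temps.values() if i < len(v)] for i in range(12)}
-- ===== Notes on version B (the rewrite author's own statement) =====
-- stated objective: simpler
-- what changed: Replaces A's twelve setdefault calls plus a row-major fan-out loop (entry-by-entry, appending each reading to its month bucket) with a single column-wise dict comprehension: months are the outer loop and each month's list is gathered by one scan over the entries.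
import Mathlib
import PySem

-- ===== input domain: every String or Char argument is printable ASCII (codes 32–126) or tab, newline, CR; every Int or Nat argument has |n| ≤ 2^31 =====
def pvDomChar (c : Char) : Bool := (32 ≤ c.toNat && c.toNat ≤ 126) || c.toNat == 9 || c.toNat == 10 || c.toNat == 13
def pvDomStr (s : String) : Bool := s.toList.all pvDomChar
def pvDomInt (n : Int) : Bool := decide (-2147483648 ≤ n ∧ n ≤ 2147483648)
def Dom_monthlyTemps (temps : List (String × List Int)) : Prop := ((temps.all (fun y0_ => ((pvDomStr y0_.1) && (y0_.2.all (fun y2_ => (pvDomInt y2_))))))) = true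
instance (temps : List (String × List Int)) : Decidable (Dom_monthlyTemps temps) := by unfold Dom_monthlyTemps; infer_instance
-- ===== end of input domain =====

-- B replaces A's row-major fan-out over entries with a column-wise dict
-- comprehension (months outer, entries inner); objective: simpler.

-- ===== PORT A =====
-- A: twelve setdefaults, then for each entry append value[i] to bucket i (i < 12).
-- monthTemps[i].append(x) is modelled by Dict.modify i [] (· ++ [x]): exact here,
-- since key i (0 ≤ i < 12) is always present after the setdefaults.
-- value[i] with 0 ≤ i < len(value) is modelled by pyGetD (in range, so exact).
def monthlyTemps (temps : List (String × List Int)) : List (Int × List Int) :=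
  let monthTemps : PySem.Dict Int (List Int) :=
    (((((((((((PySem.Dict.empty.setdefault 0 []).setdefault 1 []).setdefault 2
      []).setdefault 3 []).setdefault 4 []).setdefault 5 []).setdefault 6
      []).setdefault 7 []).setdefault 8 []).setdefault 9 []).setdefault 10
      []).setdefault 11 []
  let monthTemps := temps.foldl (fun d value =>
    (PySem.List.pyRange 0 (value.2.length : Int) 1).foldl (fun d i =>
      if i < 12 then d.modify i [] (fun l => l ++ [PySem.List.pyGetD value.2 i 0]) else d) d)
    monthTemps
  monthTemps.items

-- ===== PORT B =====
-- {i: [v[i] for v in temps.values() if i < len(v)] for i in range(12)}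
def monthlyTemps_alt (temps : List (String × List Int)) : List (Int × List Int) :=
  (PySem.List.pyRange 0 12 1).map (fun i =>
    (i, (temps.map Prod.snd).filterMap (fun v =>
          if i < (v.length : Int) then some (PySem.List.pyGetD v i 0) else none)))

-- ===== PRECONDITION & SPEC =====
def Spec_monthlyTemps (temps : List (String × List Int)) (out : List (Int × List Int)) : Prop := out = monthlyTemps_alt temps
instance (temps : List (String × List Int)) (out : List (Int × List Int)) : Decidable (Spec_monthlyTemps temps out) := by unfold Spec_monthlyTemps; infer_instance

-- ===== CLAIM (what is proved, stated in full; the proofs are below) =====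
def Claim_equal_monthlyTemps : Prop := ∀ (temps : List (String × List Int)), Dom_monthlyTemps temps → Spec_monthlyTemps temps (monthlyTemps temps)

-- ===== LEMMAS AND PROOFS =====

-- A's inner loop (one entry's readings fanned out to the buckets), unguarded form
def pvInner (v : List Int) (d : PySem.Dict Int (List Int)) : PySem.Dict Int (List Int) :=
  (PySem.List.pyRange 0 (min (v.length : Int) 12) 1).foldl
    (fun d i => d.modify i [] (fun l => l ++ [PySem.List.pyGetD v i 0])) d

-- the guarded inner fold of port A equals pvInner
theorem pvInner_eq (v : List Int) (d : PySem.Dict Int (List Int)) :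
    (PySem.List.pyRange 0 (v.length : Int) 1).foldl (fun d i =>
      if i < 12 then d.modify i [] (fun l => l ++ [PySem.List.pyGetD v i 0]) else d) d
    = pvInner v d := by
  unfold pvInner
  by_cases h : (v.length : Int) ≤ 12
  · rw [min_eq_left h]
    apply PySem.List.foldl_congr_mem
    intro acc x hx
    have hx' := (PySem.List.mem_pyRange_one).1 hx
    rw [if_pos (by omega)]
  · rw [min_eq_right (by omega)]
    rw [PySem.List.pyRange_one_append 0 12 (v.length : Int) (by omega) (by omega),
        List.foldl_append]
    have h2 : ∀ d' : PySem.Dict Int (List Int),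
        (PySem.List.pyRange 12 (v.length : Int) 1).foldl (fun d i =>
          if i < 12 then d.modify i [] (fun l => l ++ [PySem.List.pyGetD v i 0]) else d) d' = d' := by
      intro d'
      refine (PySem.List.foldl_congr_mem _ _ (fun d _ => d) _ ?_).trans
        (PySem.List.foldl_ignore _ _)
      intro acc x hx
      have hx' := (PySem.List.mem_pyRange_one).1 hx
      exact if_neg (by omega)
    rw [h2]
    apply PySem.List.foldl_congr_mem
    intro acc x hx
    have hx' := (PySem.List.mem_pyRange_one).1 hx
    exact if_pos (by omega)

-- getD through a prefix of the unguarded fan-out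
theorem pvAux_getD (v : List Int) (m : Nat) (d : PySem.Dict Int (List Int)) (k : Int) :
    ((PySem.List.pyRange 0 (m : Int) 1).foldl
      (fun d i => d.modify i [] (fun l => l ++ [PySem.List.pyGetD v i 0])) d).getD k []
    = d.getD k [] ++ (if 0 ≤ k ∧ k < (m : Int) then [PySem.List.pyGetD v k 0] else []) := by
  induction m generalizing d with
  | zero =>
    rw [show ((0 : Nat) : Int) = 0 by rfl, PySem.List.pyRange_one_eq_nil (by omega),
        List.foldl_nil, if_neg (by omega), List.append_nil]
  | succ n ih =>
    rw [show ((n + 1 : Nat) : Int) = (n : Int) + 1 by push_cast; ring,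
        PySem.List.pyRange_one_succ_right (by omega), List.foldl_append,
        List.foldl_cons, List.foldl_nil, PySem.Dict.getD_modify, ih]
    by_cases hk : k = (n : Int)
    · subst hk
      rw [if_pos rfl, ih, if_neg (show ¬(0 ≤ (n:Int) ∧ (n:Int) < (n:Int)) by omega),
          if_pos (show 0 ≤ (n:Int) ∧ (n:Int) < (n:Int)+1 by omega)]
      simp
    · rw [if_neg hk]
      by_cases h1 : 0 ≤ k ∧ k < (n : Int)
      · rw [if_pos h1, if_pos (by omega)]
      · rw [if_neg h1, if_neg (by omega)]

-- getD through pvInner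
theorem pvInner_getD (v : List Int) (d : PySem.Dict Int (List Int)) (k : Int) :
    (pvInner v d).getD k [] =
      d.getD k [] ++ (if 0 ≤ k ∧ k < (v.length : Int) ∧ k < 12
                      then [PySem.List.pyGetD v k 0] else []) := by
  unfold pvInner
  rw [show (min (v.length : Int) 12) = ((min v.length 12 : Nat) : Int) by push_cast; omega]
  rw [pvAux_getD]
  by_cases h : 0 ≤ k ∧ k < (v.length : Int) ∧ k < 12
  · rw [if_pos (by push_cast; omega), if_pos h]
  · rw [if_neg (by push_cast; omega), if_neg h]

-- keys through pvInner (buckets 0..11 already present => keys unchanged)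
theorem pvInner_keys (v : List Int) (d : PySem.Dict Int (List Int))
    (h : ∀ i : Int, 0 ≤ i → i < 12 → i ∈ d.keys) :
    (pvInner v d).keys = d.keys := by
  unfold pvInner
  rw [PySem.Dict.keys_foldl_modify]
  rw [PySem.Set.update_eq_append_filter]
  rw [List.filter_eq_nil_iff.2, List.append_nil]
  intro y hy
  have hy' : y ∈ PySem.List.pyRange 0 (min (v.length : Int) 12) 1 :=
    (PySem.Set.mem_ofList _ _).1 hy
  have hb := (PySem.List.mem_pyRange_one).1 hy'
  have : y ∈ d.keys := h y (by omega) (by omega)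
  simp [this]

-- getD through the whole outer loop
theorem pvOuter_getD (temps : List (String × List Int)) (d : PySem.Dict Int (List Int))
    (k : Int) (hk0 : 0 ≤ k) (hk : k < 12) :
    (temps.foldl (fun d value =>
        (PySem.List.pyRange 0 (value.2.length : Int) 1).foldl (fun d i =>
          if i < 12 then d.modify i [] (fun l => l ++ [PySem.List.pyGetD value.2 i 0]) else d) d) d).getD k []
    = d.getD k [] ++ temps.filterMap (fun p =>
        if k < (p.2.length : Int) then some (PySem.List.pyGetD p.2 k 0) else none) := by
  induction temps generalizing d with
  | nil => simp
  | cons p ts ih =>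
    rw [List.foldl_cons, pvInner_eq, ih, pvInner_getD, List.filterMap_cons]
    by_cases h : k < (p.2.length : Int)
    · rw [if_pos h, if_pos (by omega)]
      simp
    · rw [if_neg h, if_neg (by omega)]
      simp

-- keys through the whole outer loop
theorem pvOuter_keys (temps : List (String × List Int)) (d : PySem.Dict Int (List Int))
    (h : ∀ i : Int, 0 ≤ i → i < 12 → i ∈ d.keys) :
    (temps.foldl (fun d value =>
        (PySem.List.pyRange 0 (value.2.length : Int) 1).foldl (fun d i =>
          if i < 12 then d.modify i [] (fun l => l ++ [PySem.List.pyGetD value.2 i 0]) else d) d) d).keys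
    = d.keys := by
  induction temps generalizing d with
  | nil => rfl
  | cons p ts ih =>
    rw [List.foldl_cons, pvInner_eq, ih _ (by rw [pvInner_keys _ _ h]; exact h),
        pvInner_keys _ _ h]

-- ===== VERDICT (by name: the statement is the Claim_ definition above) =====
theorem monthlyTemps_spec : Claim_equal_monthlyTemps := by
  intro temps _
  unfold Spec_monthlyTemps monthlyTemps monthlyTemps_alt
  set d0 : PySem.Dict Int (List Int) :=
    (((((((((((PySem.Dict.empty.setdefault 0 []).setdefault 1 []).setdefault 2
      []).setdefault 3 []).setdefault 4 []).setdefault 5 []).setdefault 6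
      []).setdefault 7 []).setdefault 8 []).setdefault 9 []).setdefault 10
      []).setdefault 11 [] with hd0
  have hkeys0 : d0.keys = PySem.List.pyRange 0 12 1 := by rw [hd0]; decide
  have hmem : ∀ i : Int, 0 ≤ i → i < 12 → i ∈ d0.keys := by
    intro i h1 h2
    rw [hkeys0]
    exact (PySem.List.mem_pyRange_one).2 ⟨h1, h2⟩
  set D := temps.foldl (fun d value =>
        (PySem.List.pyRange 0 (value.2.length : Int) 1).foldl (fun d i =>
          if i < 12 then d.modify i [] (fun l => l ++ [PySem.List.pyGetD value.2 i 0]) else d) d) d0 with hD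
  have hkeys : D.keys = PySem.List.pyRange 0 12 1 := by
    rw [hD, pvOuter_keys _ _ hmem, hkeys0]
  have hnd : D.keys.Nodup := by rw [hkeys]; exact PySem.List.nodup_pyRange_one 0 12
  have hd0getD : ∀ k ∈ PySem.List.pyRange 0 12 1, d0.getD k [] = [] := by
    rw [hd0]; decide
  rw [PySem.Dict.items_eq_map_keys D hnd [], hkeys]
  apply List.map_congr_left
  intro k hkmem
  have hb := (PySem.List.mem_pyRange_one).1 hkmem
  rw [hD, pvOuter_getD _ _ _ (by omega) (by omega), hd0getD k hkmem, List.nil_append,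
      List.filterMap_map]
  rfl
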